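-- pv_equiv track=rewrite | github.com/Liebranca/kvr | src/AVTOMAT/avto-fmat.py | detlabel
-- ===== SOURCE A (Python) =====
-- lvl        = 0;
--
-- def detlabel(s,idex):
--
--   llvl = lvl;row  ="";
--   i    = 0       ;found=0 ;
--
--   for c in s[idex:]:
--
--     row=row+c;
--
-- #    ---     ---     ---     ---     ---
--
--     if( (':'       in row)
--     or  ("case"    in row)
--     or  ("default" in row) ):
--       i-=len(row);found=1;
--       break;
--
--     elif(llvl<lvl):
--       i-=len(row);found=1;
--       break;
--
-- #    ---     ---     ---     ---     ---
--
--     elif(c=='{'):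
--       llvl+=1;
--
--     elif(c=='}'):
--       llvl-=1;
--
--     elif(c in ' ;\n'):
--       row="";
--
--     i+=1;
--
--   if(i==-1):
--     return 0;
--
--   return (idex+i)*found;
-- ===== SOURCE B (Python) =====
-- def detlabel(s, idex):
--     t = s[idex:]
--     bal = 0   # brace balance of the chars already consumed
--     r = 0     # start (in t) of the current whitespace-free token
--     for k in range(len(t)):
--         c = t[k]
--         if (c == ':' or bal < 0
--                 or (k - r >= 3 and t[k-3:k+1] == "case")
--                 or (k - r >= 6 and t[k-6:k+1] == "default")):
--             return 0 if r == 0 else idex + r - 1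
--         if c == '{':
--             bal += 1
--         elif c == '}':
--             bal -= 1
--         elif c in ' ;\n':
--             r = k + 1
--     return 0
-- ===== Notes on version B (the rewrite author's own statement) =====
-- stated objective: faster
-- what changed: A rebuilds a growing token string and re-scans it with three substring searches on every character; B makes a single pass keeping only a token-start index and a brace balance, testing the current character and two fixed-size windows of the text in O(1) per character.
import Mathlib
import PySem

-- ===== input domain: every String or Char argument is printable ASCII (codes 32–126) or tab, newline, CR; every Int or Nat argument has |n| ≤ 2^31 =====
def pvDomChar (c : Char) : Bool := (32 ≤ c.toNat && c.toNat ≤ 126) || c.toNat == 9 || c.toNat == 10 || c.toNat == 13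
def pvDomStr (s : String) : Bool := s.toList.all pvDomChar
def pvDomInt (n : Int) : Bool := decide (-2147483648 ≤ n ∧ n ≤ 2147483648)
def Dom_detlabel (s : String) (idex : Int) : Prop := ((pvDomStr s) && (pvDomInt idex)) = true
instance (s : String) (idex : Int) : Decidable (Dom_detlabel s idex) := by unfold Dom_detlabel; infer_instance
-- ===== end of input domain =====

-- B replaces A's per-character re-scan of the growing token (substring tests on `row`)
-- by a single pass with O(1) work per char: a token-start index plus fixed-size window
-- comparisons against the text itself; objective: faster (asymptotic).

-- ===== PORT A =====
def pvLvl : Int := 0   -- the module-level global `lvl`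

-- the `for c in s[idex:]` loop; state (llvl, row, i); returns (i, found)
def detlabelLoop (cs : List Char) (llvl : Int) (row : List Char) (i : Int) : Int × Int :=
  match cs with
  | [] => (i, 0)
  | c :: rest =>
    let row2 := row ++ [c]
    if PySem.Chars.isIn [':'] row2 || PySem.Chars.isIn "case".toList row2
        || PySem.Chars.isIn "default".toList row2 then
      (i - row2.length, 1)
    else if llvl < pvLvl then
      (i - row2.length, 1)
    else if c = '{' then detlabelLoop rest (llvl + 1) row2 (i + 1)
    else if c = '}' then detlabelLoop rest (llvl - 1) row2 (i + 1)
    else if c ∈ [' ', ';', '\n'] then detlabelLoop rest llvl [] (i + 1)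
    else detlabelLoop rest llvl row2 (i + 1)

def detlabel (s : String) (idex : Int) : Int :=
  let t := PySem.List.slice s.toList (some idex) none
  let res := detlabelLoop t pvLvl [] 0
  if res.1 = -1 then 0 else (idex + res.1) * res.2

-- ===== PORT B =====
-- Source B's `for k in range(len(t))` loop; state (k, bal, r)
def detlabelAltLoop (t : List Char) (idex : Int) (k : Nat) (bal : Int) (r : Nat) : Int :=
  if h : k < t.length then
    let c := t[k]
    if c = ':' ∨ bal < 0 ∨
        (k - r ≥ 3 ∧ PySem.List.slice t (some ((k : Int) - 3)) (some ((k : Int) + 1)) = "case".toList) ∨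
        (k - r ≥ 6 ∧ PySem.List.slice t (some ((k : Int) - 6)) (some ((k : Int) + 1)) = "default".toList) then
      if r = 0 then 0 else idex + (r : Int) - 1
    else if c = '{' then detlabelAltLoop t idex (k + 1) (bal + 1) r
    else if c = '}' then detlabelAltLoop t idex (k + 1) (bal - 1) r
    else if c ∈ [' ', ';', '\n'] then detlabelAltLoop t idex (k + 1) bal (k + 1)
    else detlabelAltLoop t idex (k + 1) bal r
  else 0
termination_by t.length - k
decreasing_by all_goals omega

def detlabel_alt (s : String) (idex : Int) : Int :=
  detlabelAltLoop (PySem.List.slice s.toList (some idex) none) idex 0 0 0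

-- ===== PRECONDITION & SPEC =====
def Spec_detlabel (s : String) (idex : Int) (out : Int) : Prop := out = detlabel_alt s idex
instance (s : String) (idex : Int) (out : Int) : Decidable (Spec_detlabel s idex out) := by unfold Spec_detlabel; infer_instance

-- ===== CLAIM (what is proved, stated in full; the proofs are below) =====
def Claim_equal_detlabel : Prop := ∀ (s : String) (idex : Int), Dom_detlabel s idex → Spec_detlabel s idex (detlabel s idex)

-- ===== LEMMAS AND PROOFS =====

-- injectivity of appending one element
lemma concat_inj_aux {xs ys : List Char} {a b : Char} (h : xs ++ [a] = ys ++ [b]) :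
    xs = ys ∧ a = b := by
  have h' := congrArg List.reverse h
  simp only [List.reverse_append, List.reverse_cons, List.reverse_nil, List.nil_append,
    List.singleton_append] at h'
  obtain ⟨h1, h2⟩ := List.cons.inj h'
  refine ⟨?_, h1⟩
  have := congrArg List.reverse h2
  simpa using this

-- an occurrence of a pattern in xs ++ [c] is either inside xs or ends at c
lemma infix_concat_iff (pat xs : List Char) (c : Char) :
    pat <:+: xs ++ [c] ↔ pat <:+: xs ∨ pat <:+ xs ++ [c] := by
  constructor
  · rintro ⟨s, t, h⟩
    rcases t.eq_nil_or_concat with rfl | ⟨t', c', rfl⟩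
    · right; exact ⟨s, by simpa using h⟩
    · left
      have h' : (s ++ (pat ++ t')) ++ [c'] = xs ++ [c] := by
        simpa [List.append_assoc] using h
      obtain ⟨hxs, -⟩ := concat_inj_aux h'
      exact ⟨s, t', by simpa [List.append_assoc] using hxs⟩
  · rintro (h | h)
    · exact h.trans (List.prefix_append xs [c]).isInfix
    · exact h.isInfix

lemma suffix_singleton_concat_iff (x c : Char) (xs : List Char) :
    [x] <:+ xs ++ [c] ↔ c = x := by
  constructor
  · rintro ⟨s, h⟩
    exact ((concat_inj_aux h).2).symm
  · rintro rfl; exact ⟨xs, rfl⟩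

-- the window characterisation: pattern of length m+1 newly appears at c iff the token is long
-- enough and the last m chars of the text before c, plus c, spell the pattern
lemma suffix_window (p : List Char) (c : Char) (r m : Nat) (pat : List Char)
    (hL : pat.length = m + 1) (hr : r ≤ p.length) :
    pat <:+ p.drop r ++ [c] ↔
      (p.length - r ≥ m ∧ p.drop (p.length - m) ++ [c] = pat) := by
  constructor
  · intro hs
    have hlen : pat.length ≤ (p.drop r ++ [c]).length := hs.length_le
    simp only [List.length_append, List.length_drop, List.length_cons, List.length_nil, hL] at hlen
    have hge : p.length - r ≥ m := by omega
    refine ⟨hge, ?_⟩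
    have hdrop := List.suffix_iff_eq_drop.mp hs
    have hlen2 : (p.drop r ++ [c]).length = (p.length - r) + 1 := by
      simp only [List.length_append, List.length_drop, List.length_cons, List.length_nil]
    rw [hlen2, hL] at hdrop
    have harith : r + ((p.length - r + 1) - (m + 1)) = p.length - m := by omega
    rw [List.drop_append_of_le_length (by simp only [List.length_drop]; omega),
        List.drop_drop, harith] at hdrop
    exact hdrop.symm
  · rintro ⟨hge, hpat⟩
    rw [← hpat]
    have hre : p.drop (p.length - m) = (p.drop r).drop ((p.length - r) - m) := by
      rw [List.drop_drop]; congr 1; omega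
    rw [hre]
    obtain ⟨u, hu⟩ := List.drop_suffix ((p.length - r) - m) (p.drop r)
    exact ⟨u, by rw [← List.append_assoc, hu]⟩

-- the slice t[k-m : k+1] of the full text t = p ++ c :: rest' (k = p.length, m ≤ k)
lemma slice_window (p rest' : List Char) (c : Char) (m : Nat) (hm : m ≤ p.length) :
    PySem.List.slice (p ++ c :: rest') (some ((p.length : Int) - m)) (some ((p.length : Int) + 1)) =
      p.drop (p.length - m) ++ [c] := by
  have e1 : ((p.length : Int) - m) = ((p.length - m : Nat) : Int) := by omega
  have e2 : ((p.length : Int) + 1) = (((p.length + 1) : Nat) : Int) := by omega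
  rw [e1, e2, PySem.List.slice_natCast]
  rw [List.drop_append_of_le_length (by omega)]
  have e3 : p.length + 1 - (p.length - m) = m + 1 := by omega
  rw [e3]
  have hl : (p.drop (p.length - m)).length = m := by
    simp only [List.length_drop]; omega
  conv_lhs => rw [show m + 1 = (p.drop (p.length - m)).length + 1 by rw [hl]]
  rw [List.take_append]
  simp

-- main loop invariant: A's loop on (bal, row = p.drop r, i = p.length) agrees with B's loop
-- on (k = p.length, bal, r), provided no pattern already occurs in the current token
set_option maxHeartbeats 2000000 in
lemma loop_agree (rest : List Char) : ∀ (p : List Char) (bal : Int) (r : Nat) (idex : Int),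
    r ≤ p.length →
    ¬ [':'] <:+: p.drop r →
    ¬ "case".toList <:+: p.drop r →
    ¬ "default".toList <:+: p.drop r →
    (if (detlabelLoop rest bal (p.drop r) (p.length : Int)).1 = -1 then 0
     else (idex + (detlabelLoop rest bal (p.drop r) (p.length : Int)).1)
            * (detlabelLoop rest bal (p.drop r) (p.length : Int)).2)
    = detlabelAltLoop (p ++ rest) idex p.length bal r := by
  induction rest with
  | nil =>
    intro p bal r idex hr h1 h2 h3
    rw [detlabelAltLoop, dif_neg (by simp)]
    simp only [detlabelLoop]
    rw [if_neg (by omega : ¬ ((p.length : Int) = -1))]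
    ring
  | cons c rest' ih =>
    intro p bal r idex hr h1 h2 h3
    have hk : p.length < (p ++ c :: rest').length := by simp
    have hget : (p ++ c :: rest')[p.length]'hk = c := by
      rw [List.getElem_append_right (by omega)]; simp
    rw [detlabelAltLoop, dif_pos hk]
    -- condition equivalences
    have eColon : [':'] <:+: p.drop r ++ [c] ↔ c = ':' := by
      rw [infix_concat_iff, suffix_singleton_concat_iff]
      simp [h1]
    have eCase : "case".toList <:+: p.drop r ++ [c] ↔
        (p.length - r ≥ 3 ∧ PySem.List.slice (p ++ c :: rest')
           (some ((p.length : Int) - 3)) (some ((p.length : Int) + 1)) = "case".toList) := by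
      rw [infix_concat_iff]
      simp only [h2, false_or]
      rw [suffix_window p c r 3 _ (by decide) hr]
      constructor
      · rintro ⟨hge, hpat⟩
        refine ⟨hge, ?_⟩
        have sw := slice_window p rest' c 3 (by omega)
        push_cast at sw
        rw [sw]
        exact hpat
      · rintro ⟨hge, hpat⟩
        refine ⟨hge, ?_⟩
        have sw := slice_window p rest' c 3 (by omega)
        push_cast at sw
        rw [sw] at hpat
        exact hpat
    have eDef : "default".toList <:+: p.drop r ++ [c] ↔
        (p.length - r ≥ 6 ∧ PySem.List.slice (p ++ c :: rest')
           (some ((p.length : Int) - 6)) (some ((p.length : Int) + 1)) = "default".toList) := by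
      rw [infix_concat_iff]
      simp only [h3, false_or]
      rw [suffix_window p c r 6 _ (by decide) hr]
      constructor
      · rintro ⟨hge, hpat⟩
        refine ⟨hge, ?_⟩
        have sw := slice_window p rest' c 6 (by omega)
        push_cast at sw
        rw [sw]
        exact hpat
      · rintro ⟨hge, hpat⟩
        refine ⟨hge, ?_⟩
        have sw := slice_window p rest' c 6 (by omega)
        push_cast at sw
        rw [sw] at hpat
        exact hpat
    simp only [hget]
    by_cases hbrk : [':'] <:+: p.drop r ++ [c] ∨ "case".toList <:+: p.drop r ++ [c]
        ∨ "default".toList <:+: p.drop r ++ [c] ∨ bal < 0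
    · -- break in A ↔ break in B, both compute the same value from r
      have hBcond : (c = ':' ∨ bal < 0 ∨
          (p.length - r ≥ 3 ∧ PySem.List.slice (p ++ c :: rest')
             (some ((p.length : Int) - 3)) (some ((p.length : Int) + 1)) = "case".toList) ∨
          (p.length - r ≥ 6 ∧ PySem.List.slice (p ++ c :: rest')
             (some ((p.length : Int) - 6)) (some ((p.length : Int) + 1)) = "default".toList)) := by
        rcases hbrk with h | h | h | h
        · exact Or.inl (eColon.mp h)
        · exact Or.inr (Or.inr (Or.inl (eCase.mp h)))
        · exact Or.inr (Or.inr (Or.inr (eDef.mp h)))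
        · exact Or.inr (Or.inl h)
      rw [if_pos hBcond]
      have hAval : detlabelLoop (c :: rest') bal (p.drop r) (p.length : Int)
          = ((p.length : Int) - ((p.drop r ++ [c]).length : Int), 1) := by
        simp only [detlabelLoop]
        by_cases hpat : [':'] <:+: p.drop r ++ [c] ∨ "case".toList <:+: p.drop r ++ [c]
            ∨ "default".toList <:+: p.drop r ++ [c]
        · have : (PySem.Chars.isIn [':'] (p.drop r ++ [c])
              || PySem.Chars.isIn "case".toList (p.drop r ++ [c])
              || PySem.Chars.isIn "default".toList (p.drop r ++ [c])) = true := by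
            simp only [Bool.or_eq_true, PySem.Chars.isIn_iff_infix]
            tauto
          rw [if_pos this]
        · have hbal : bal < 0 := by tauto
          have : (PySem.Chars.isIn [':'] (p.drop r ++ [c])
              || PySem.Chars.isIn "case".toList (p.drop r ++ [c])
              || PySem.Chars.isIn "default".toList (p.drop r ++ [c])) = false := by
            push Not at hpat
            simp only [Bool.or_eq_false_iff, PySem.Chars.isIn_eq_false_iff]
            exact ⟨⟨hpat.1, hpat.2.1⟩, hpat.2.2⟩
          rw [this, if_neg (by simp), if_pos (show bal < pvLvl by simpa [pvLvl] using hbal)]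
      rw [hAval]
      have hlen : ((p.drop r ++ [c]).length : Int) = (p.length : Int) - r + 1 := by
        simp only [List.length_append, List.length_drop, List.length_cons, List.length_nil]
        omega
      simp only [hlen]
      split_ifs with hA hB hB
      · rfl
      · exfalso; omega
      · exfalso; omega
      · ring
    · -- no break: both step; four disjoint update cases
      push Not at hbrk
      obtain ⟨hb1, hb2, hb3, hb4⟩ := hbrk
      have hBcond : ¬ (c = ':' ∨ bal < 0 ∨
          (p.length - r ≥ 3 ∧ PySem.List.slice (p ++ c :: rest')
             (some ((p.length : Int) - 3)) (some ((p.length : Int) + 1)) = "case".toList) ∨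
          (p.length - r ≥ 6 ∧ PySem.List.slice (p ++ c :: rest')
             (some ((p.length : Int) - 6)) (some ((p.length : Int) + 1)) = "default".toList)) := by
        push Not
        exact ⟨fun h => hb1 (eColon.mpr h), hb4,
          fun h h' => hb2 (eCase.mpr ⟨h, h'⟩), fun h h' => hb3 (eDef.mpr ⟨h, h'⟩)⟩
      rw [if_neg hBcond]
      have hAstep : detlabelLoop (c :: rest') bal (p.drop r) (p.length : Int) =
          (if c = '{' then detlabelLoop rest' (bal + 1) (p.drop r ++ [c]) ((p.length : Int) + 1)
           else if c = '}' then detlabelLoop rest' (bal - 1) (p.drop r ++ [c]) ((p.length : Int) + 1)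
           else if c ∈ [' ', ';', '\n'] then detlabelLoop rest' bal [] ((p.length : Int) + 1)
           else detlabelLoop rest' bal (p.drop r ++ [c]) ((p.length : Int) + 1)) := by
        simp only [detlabelLoop]
        have : (PySem.Chars.isIn [':'] (p.drop r ++ [c])
            || PySem.Chars.isIn "case".toList (p.drop r ++ [c])
            || PySem.Chars.isIn "default".toList (p.drop r ++ [c])) = false := by
          simp only [Bool.or_eq_false_iff, PySem.Chars.isIn_eq_false_iff]
          exact ⟨⟨hb1, hb2⟩, hb3⟩
        rw [this, if_neg (by simp), if_neg (show ¬ bal < pvLvl by simpa [pvLvl] using hb4)]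
      rw [hAstep]
      -- shared facts for applying ih with p' = p ++ [c]
      have hdropc : ∀ r', r' ≤ p.length → (p ++ [c]).drop r' = p.drop r' ++ [c] :=
        fun r' hr' => List.drop_append_of_le_length hr'
      have hassoc : (p ++ [c]) ++ rest' = p ++ c :: rest' := by simp
      have hlen' : (p ++ [c]).length = p.length + 1 := by simp
      by_cases hc1 : c = '{'
      · rw [if_pos hc1]
        have := ih (p ++ [c]) (bal + 1) r idex (by simp; omega)
          (by rw [hdropc r hr]; exact hb1) (by rw [hdropc r hr]; exact hb2)
          (by rw [hdropc r hr]; exact hb3)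
        rw [hassoc, hlen'] at this
        rw [hdropc r hr] at this
        rw [if_pos hc1]
        push_cast at this ⊢
        exact this
      · rw [if_neg hc1, if_neg hc1]
        by_cases hc2 : c = '}'
        · rw [if_pos hc2, if_pos hc2]
          have := ih (p ++ [c]) (bal - 1) r idex (by simp; omega)
            (by rw [hdropc r hr]; exact hb1) (by rw [hdropc r hr]; exact hb2)
            (by rw [hdropc r hr]; exact hb3)
          rw [hassoc, hlen'] at this
          rw [hdropc r hr] at this
          push_cast at this ⊢
          exact this
        · rw [if_neg hc2, if_neg hc2]
          by_cases hc3 : c ∈ [' ', ';', '\n']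
          · rw [if_pos hc3, if_pos hc3]
            have hdropall : (p ++ [c]).drop (p.length + 1) = [] := by
              apply List.drop_eq_nil_of_le; simp
            have := ih (p ++ [c]) bal (p.length + 1) idex (by simp)
              (by rw [hdropall]; rintro ⟨s, t, h⟩; simp at h)
              (by rw [hdropall]; rintro ⟨s, t, h⟩; simp at h)
              (by rw [hdropall]; rintro ⟨s, t, h⟩; simp at h)
            rw [hassoc, hlen'] at this
            rw [hdropall] at this
            push_cast at this ⊢
            exact this
          · rw [if_neg hc3, if_neg hc3]
            have := ih (p ++ [c]) bal r idex (by simp; omega)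
              (by rw [hdropc r hr]; exact hb1) (by rw [hdropc r hr]; exact hb2)
              (by rw [hdropc r hr]; exact hb3)
            rw [hassoc, hlen'] at this
            rw [hdropc r hr] at this
            push_cast at this ⊢
            exact this

-- ===== VERDICT (by name: the statement is the Claim_ definition above) =====
set_option maxHeartbeats 2000000 in
theorem detlabel_spec : Claim_equal_detlabel := by
  intro s idex _
  unfold Spec_detlabel detlabel detlabel_alt
  have := loop_agree (PySem.List.slice s.toList (some idex) none) [] pvLvl 0 idex
    (by simp) (by rintro ⟨s, t, h⟩; simp at h) (by rintro ⟨s, t, h⟩; simp at h)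
    (by rintro ⟨s, t, h⟩; simp at h)
  simpa [pvLvl] using this
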